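-- pv_equiv track=rewrite | github.com/MihirKaushal/VSCode_Python_Chess | backend/services/game_service.py | _build_back_rank
-- ===== SOURCE A (Python) =====
-- def _build_back_rank(board_cols: int) -> list[str]:
--     rank: list[str] = ["pawn"] * board_cols
--     left = 0
--     right = board_cols - 1
--     cycle = ["rook", "knight", "bishop"]
--     cycle_index = 0
--
--     while right - left + 1 > 2:
--         piece_type = cycle[cycle_index % len(cycle)]
--         rank[left] = piece_type
--         rank[right] = piece_type
--         left += 1
--         right -= 1
--         cycle_index += 1
--
--     if board_cols % 2 == 0:
--         rank[left] = "queen"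
--         rank[right] = "king"
--     else:
--         rank[left] = "king"
--
--     return rank
-- ===== SOURCE B (Python) =====
-- def _build_back_rank(board_cols: int) -> list[str]:
--     # Distance-based single forward pass instead of the inward two-pointer walk.
--     cycle = ["rook", "knight", "bishop"]
--     rank = [cycle[min(i, board_cols - 1 - i) % 3] for i in range(board_cols)]
--     mid = board_cols // 2
--     if board_cols % 2 == 0:
--         rank[mid - 1] = "queen"
--         rank[mid] = "king"
--     else:
--         rank[mid] = "king"
--     return rank
-- ===== Notes on version B (the rewrite author's own statement) =====
-- stated objective: simpler
-- what changed: Replaces the stateful inward two-pointer loop (left/right/cycle_index over a mutated pawn list) with a single forward comprehension computing each piece directly from its distance to the nearer edge, plus the same two center index assignments.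
import Mathlib
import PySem

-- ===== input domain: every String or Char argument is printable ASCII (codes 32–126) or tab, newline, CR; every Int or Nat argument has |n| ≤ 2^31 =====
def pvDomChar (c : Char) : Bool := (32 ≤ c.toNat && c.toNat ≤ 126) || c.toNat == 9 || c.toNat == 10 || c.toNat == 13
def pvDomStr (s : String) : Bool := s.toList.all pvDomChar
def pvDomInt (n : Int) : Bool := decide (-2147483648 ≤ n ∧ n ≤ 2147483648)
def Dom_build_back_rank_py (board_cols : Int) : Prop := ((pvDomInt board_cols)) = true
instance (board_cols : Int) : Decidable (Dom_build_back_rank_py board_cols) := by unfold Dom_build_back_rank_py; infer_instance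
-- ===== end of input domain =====

-- B replaces A's stateful inward two-pointer loop with a single forward pass computing each
-- piece from its distance to the nearer edge (same cost; objective: simpler decomposition).


-- ===== PORT A =====
-- rank[i] = v: exact for the nonnegative in-range indices reached inside Pre_;
-- out of range Python raises IndexError (those inputs are excluded by Pre_).
def pvSetPy (xs : List String) (i : Int) (v : String) : List String :=
  if 0 ≤ i ∧ i < (xs.length : Int) then xs.set i.toNat v else xs

-- cycle[c % len(cycle)] for cycle = ["rook","knight","bishop"] (used by both sources verbatim)
def pvPiece (c : Int) : String :=
  PySem.List.pyGetD ["rook", "knight", "bishop"] (PySem.Int.mod c 3) ""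

-- the while loop of A: state (rank, left, right, cycle_index); returns (rank, left, right)
def bbLoop (rank : List String) (left right cidx : Int) : List String × Int × Int :=
  if right - left + 1 > 2 then
    let piece := pvPiece cidx
    bbLoop (pvSetPy (pvSetPy rank left piece) right piece) (left + 1) (right - 1) (cidx + 1)
  else (rank, left, right)
termination_by (right - left + 1).toNat
decreasing_by omega

def build_back_rank_py (board_cols : Int) : List String :=
  let rank := List.replicate board_cols.toNat "pawn"
  let s := bbLoop rank 0 (board_cols - 1) 0
  if PySem.Int.mod board_cols 2 = 0 then
    pvSetPy (pvSetPy s.1 s.2.1 "queen") s.2.2 "king"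
  else
    pvSetPy s.1 s.2.1 "king"

-- ===== PORT B =====
def build_back_rank_py_alt (board_cols : Int) : List String :=
  let rank := (PySem.List.pyRange 0 board_cols 1).map
    (fun i => pvPiece (min i (board_cols - 1 - i)))
  let mid := PySem.Int.floordiv board_cols 2
  if PySem.Int.mod board_cols 2 = 0 then
    pvSetPy (pvSetPy rank (mid - 1) "queen") mid "king"
  else
    pvSetPy rank mid "king"

-- ===== PRECONDITION & SPEC =====
-- Pre_ excludes exactly board_cols ≤ 0, where the Python A raises IndexError on the center assignment.
def Pre_build_back_rank_py (board_cols : Int) : Prop := 1 ≤ board_cols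
instance (board_cols : Int) : Decidable (Pre_build_back_rank_py board_cols) := by
  unfold Pre_build_back_rank_py; infer_instance

def pvWitness_build_back_rank_py : Int := 8

def Spec_build_back_rank_py (board_cols : Int) (out : List String) : Prop := out = build_back_rank_py_alt board_cols
instance (board_cols : Int) (out : List String) : Decidable (Spec_build_back_rank_py board_cols out) := by unfold Spec_build_back_rank_py; infer_instance

-- ===== CLAIM (what is proved, stated in full; the proofs are below) =====
def Claim_equal_build_back_rank_py : Prop := ∀ (board_cols : Int), Dom_build_back_rank_py board_cols → Pre_build_back_rank_py board_cols → Spec_build_back_rank_py board_cols (build_back_rank_py board_cols)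

-- ===== LEMMAS AND PROOFS =====

theorem pvSetPy_length (xs : List String) (i : Int) (v : String) :
    (pvSetPy xs i v).length = xs.length := by
  unfold pvSetPy; split <;> simp

theorem pvSetPy_getElem? (xs : List String) (i : Int) (v : String) (j : Nat)
    (hi : 0 ≤ i) (hilt : i < (xs.length : Int)) :
    (pvSetPy xs i v)[j]? = if (j : Int) = i then some v else xs[j]? := by
  unfold pvSetPy
  rw [if_pos ⟨hi, hilt⟩]
  by_cases h : (j : Int) = i
  · have hj : j = i.toNat := by omega
    subst hj
    rw [if_pos h, List.getElem?_set_self (by omega)]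
  · rw [if_neg h, List.getElem?_set_ne (by omega)]

theorem bbLoop_spec (m : Nat) : ∀ (rank : List String) (l r c : Int),
    (r - l + 1).toNat = m → 0 ≤ l → r < (rank.length : Int) →
    (bbLoop rank l r c).1.length = rank.length ∧
    (bbLoop rank l r c).2.1 = l + ((m - 1) / 2 : Nat) ∧
    (bbLoop rank l r c).2.2 = r - ((m - 1) / 2 : Nat) ∧
    ∀ j : Nat, j < rank.length →
      (bbLoop rank l r c).1[j]? =
        if l ≤ (j : Int) ∧ (j : Int) ≤ r ∧ 2 * min ((j : Int) - l) (r - (j : Int)) ≤ r - l - 2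
        then some (pvPiece (c + min ((j : Int) - l) (r - (j : Int))))
        else rank[j]? := by
  induction m using Nat.strong_induction_on with
  | _ m IH =>
    intro rank l r c hm hl hr
    by_cases hc : r - l + 1 > 2
    · -- one loop iteration
      have hm3 : 3 ≤ m := by omega
      rw [bbLoop, if_pos hc]
      set rank' := pvSetPy (pvSetPy rank l (pvPiece c)) r (pvPiece c) with hrank'
      have hlen' : rank'.length = rank.length := by
        rw [hrank', pvSetPy_length, pvSetPy_length]
      have hspec := IH (m - 2) (by omega) rank' (l + 1) (r - 1) (c + 1)
        (by omega) (by omega) (by rw [hlen']; omega)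
      obtain ⟨h1, h2, h3, h4⟩ := hspec
      refine ⟨by rw [h1, hlen'], by rw [h2]; omega, by rw [h3]; omega, ?_⟩
      intro j hj
      rw [h4 j (by rw [hlen']; exact hj)]
      have hrank'j : rank'[j]? =
          if (j : Int) = r then some (pvPiece c)
          else if (j : Int) = l then some (pvPiece c) else rank[j]? := by
        rw [hrank', pvSetPy_getElem? _ _ _ _ (by omega) (by rw [pvSetPy_length]; omega),
            pvSetPy_getElem? _ _ _ _ hl (by omega)]
      by_cases hjl : (j : Int) = l
      · -- written this iteration, at the left
        have : ¬ (l + 1 ≤ (j : Int) ∧ (j : Int) ≤ r - 1 ∧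
            2 * min ((j : Int) - (l + 1)) (r - 1 - (j : Int)) ≤ r - 1 - (l + 1) - 2) := by omega
        rw [if_neg this, hrank'j, if_neg (by omega), if_pos hjl,
            if_pos ⟨by omega, by omega, by omega⟩]
        have : c + min ((j : Int) - l) (r - (j : Int)) = c := by omega
        rw [this]
      · by_cases hjr : (j : Int) = r
        · have : ¬ (l + 1 ≤ (j : Int) ∧ (j : Int) ≤ r - 1 ∧
              2 * min ((j : Int) - (l + 1)) (r - 1 - (j : Int)) ≤ r - 1 - (l + 1) - 2) := by omega
          rw [if_neg this, hrank'j, if_pos hjr,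
              if_pos ⟨by omega, by omega, by omega⟩]
          have : c + min ((j : Int) - l) (r - (j : Int)) = c := by omega
          rw [this]
        · -- not touched this iteration
          rw [hrank'j, if_neg hjr, if_neg hjl]
          by_cases hin : l + 1 ≤ (j : Int) ∧ (j : Int) ≤ r - 1 ∧
              2 * min ((j : Int) - (l + 1)) (r - 1 - (j : Int)) ≤ r - 1 - (l + 1) - 2
          · rw [if_pos hin, if_pos ⟨by omega, by omega, by omega⟩]
            have : c + 1 + min ((j : Int) - (l + 1)) (r - 1 - (j : Int)) =
                c + min ((j : Int) - l) (r - (j : Int)) := by omega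
            rw [this]
          · rw [if_neg hin, if_neg (by omega)]
    · -- loop exits immediately
      rw [bbLoop, if_neg hc]
      have hk : ((m - 1) / 2 : Nat) = 0 := by omega
      refine ⟨rfl, by simp [hk], by simp [hk], ?_⟩
      intro j hj
      rw [if_neg (by omega)]

-- expected content of the back rank at position j, proved for both ports
def pvExpected (n : Int) (j : Nat) : String :=
  if (j : Int) = n / 2 then "king"
  else if n % 2 = 0 ∧ (j : Int) = n / 2 - 1 then "queen"
  else pvPiece (min (j : Int) (n - 1 - (j : Int)))

theorem A_char (n : Int) (hn : 1 ≤ n) :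
    (build_back_rank_py n).length = n.toNat ∧
    ∀ j : Nat, j < n.toNat → (build_back_rank_py n)[j]? = some (pvExpected n j) := by
  have hmod : PySem.Int.mod n 2 = n % 2 := PySem.Int.mod_eq_emod_of_pos (by norm_num)
  obtain ⟨hlen, hleft, hright, helem⟩ :=
    bbLoop_spec n.toNat (List.replicate n.toNat "pawn") 0 (n - 1) 0 (by omega) le_rfl
      (by rw [List.length_replicate]; omega)
  simp only [build_back_rank_py, hmod]
  rw [hleft, hright]
  by_cases he : n % 2 = 0
  · rw [if_pos he]
    constructor
    · rw [pvSetPy_length, pvSetPy_length, hlen, List.length_replicate]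
    · intro j hj
      rw [pvSetPy_getElem? _ _ _ _ (by omega)
            (by rw [pvSetPy_length, hlen, List.length_replicate]; omega),
          pvSetPy_getElem? _ _ _ _ (by omega) (by rw [hlen, List.length_replicate]; omega),
          helem j (by rw [List.length_replicate]; omega)]
      simp only [pvExpected]
      split_ifs <;>
        first
          | rfl
          | (exfalso; omega)
          | (simp only [Option.some.injEq]; congr 1; omega)
  · rw [if_neg he]
    constructor
    · rw [pvSetPy_length, hlen, List.length_replicate]
    · intro j hj
      rw [pvSetPy_getElem? _ _ _ _ (by omega) (by rw [hlen, List.length_replicate]; omega),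
          helem j (by rw [List.length_replicate]; omega)]
      simp only [pvExpected]
      split_ifs <;>
        first
          | rfl
          | (exfalso; omega)
          | (simp only [Option.some.injEq]; congr 1; omega)

theorem B_base_elem (n : Int) (j : Nat) (hj : j < n.toNat) :
    ((PySem.List.pyRange 0 n 1).map (fun i => pvPiece (min i (n - 1 - i))))[j]? =
      some (pvPiece (min (j : Int) (n - 1 - (j : Int)))) := by
  rw [List.getElem?_map, PySem.List.pyRange_one]
  rw [List.getElem?_map, List.getElem?_range (by omega)]
  simp

theorem B_char (n : Int) (hn : 1 ≤ n) :
    (build_back_rank_py_alt n).length = n.toNat ∧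
    ∀ j : Nat, j < n.toNat → (build_back_rank_py_alt n)[j]? = some (pvExpected n j) := by
  have hmod : PySem.Int.mod n 2 = n % 2 := PySem.Int.mod_eq_emod_of_pos (by norm_num)
  have hdiv : PySem.Int.floordiv n 2 = n / 2 := PySem.Int.floordiv_eq_ediv_of_pos (by norm_num)
  have hblen : ((PySem.List.pyRange 0 n 1).map (fun i => pvPiece (min i (n - 1 - i)))).length
      = n.toNat := by
    rw [List.length_map, PySem.List.length_pyRange_one]; omega
  simp only [build_back_rank_py_alt, hmod, hdiv]
  by_cases he : n % 2 = 0
  · rw [if_pos he]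
    constructor
    · rw [pvSetPy_length, pvSetPy_length, hblen]
    · intro j hj
      rw [pvSetPy_getElem? _ _ _ _ (by omega) (by rw [pvSetPy_length, hblen]; omega),
          pvSetPy_getElem? _ _ _ _ (by omega) (by rw [hblen]; omega),
          B_base_elem n j hj]
      simp only [pvExpected]
      split_ifs <;> first | rfl | (exfalso; omega)
  · rw [if_neg he]
    constructor
    · rw [pvSetPy_length, hblen]
    · intro j hj
      rw [pvSetPy_getElem? _ _ _ _ (by omega) (by rw [hblen]; omega),
          B_base_elem n j hj]
      simp only [pvExpected]
      split_ifs <;> first | rfl | (exfalso; omega)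

-- ===== VERDICT (by name: the statement is the Claim_ definition above) =====
theorem build_back_rank_py_spec : Claim_equal_build_back_rank_py := by
  intro n hdom hpre
  unfold Spec_build_back_rank_py
  have hn : 1 ≤ n := hpre
  obtain ⟨hAlen, hAelem⟩ := A_char n hn
  obtain ⟨hBlen, hBelem⟩ := B_char n hn
  apply List.ext_getElem?
  intro j
  by_cases hj : j < n.toNat
  · rw [hAelem j hj, hBelem j hj]
  · rw [List.getElem?_eq_none (by omega), List.getElem?_eq_none (by omega)]
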